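-- pv_equiv track=rewrite | github.com/coldbeeen/cote_study | programmers/파괴되지 않은 건물(복기)_chanbeen.py | solution
-- ===== SOURCE A (Python) =====
-- def solution(board, skill):
--     answer = 0
--
--     N = len(board)
--     M = len(board[0])
--
--     damage = [[0] * (M + 1) for _ in range(N + 1)]
--
--     for type, r1, c1, r2, c2, degree in skill:
--         value = -degree if type == 1 else degree
--
--         damage[r1][c1] += value
--         damage[r1][c2 + 1] -= value #12번 줄의 value 상쇄용
--         damage[r2 + 1][c1] -= value
--         damage[r2 + 1][c2 + 1] += value #14번 줄의 value 상쇄용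
--
--     for i in range(N): #열방향 데미지 누적
--         for j in range(M):
--             damage[i][j + 1] += damage[i][j]
--
--     for j in range(M): #행방향 데미지 누적
--         for i in range(N):
--             damage[i + 1][j] += damage[i][j]
--
--     for i in range(N):
--         for j in range(M):
--             board[i][j] += damage[i][j] #해당 건물에 누적된 데미지 한번에 계산
--
--             if board[i][j] > 0:
--                 answer += 1
--
--     return answer
-- ===== SOURCE B (Python) =====
-- def solution(board, skill):
--     M = len(board[0])
--     for type, r1, c1, r2, c2, degree in skill:
--         value = -degree if type == 1 else degree
--         for r in range(r1, r2 + 1):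
--             for c in range(c1, c2 + 1):
--                 board[r][c] += value
--     answer = 0
--     for i in range(len(board)):
--         for j in range(M):
--             if board[i][j] > 0:
--                 answer += 1
--     return answer
-- ===== Notes on version B (the rewrite author's own statement) =====
-- stated objective: simpler
-- what changed: Replaces the 2D difference array with its two prefix-sum accumulation passes by directly adding each skill's value to every cell of its rectangle, then one counting pass; same in-place mutation of board.
-- outside the precondition, e.g. on solution([[3, 3], [3, 3], [3, 3]], [[2, 2, 0, 0, 1, 5]]): A returns 4, B returns 6; on solution([[1], [1]], [[2, -1, 0, -1, 0, 7]]): A returns 0, B returns 2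
import Mathlib
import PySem

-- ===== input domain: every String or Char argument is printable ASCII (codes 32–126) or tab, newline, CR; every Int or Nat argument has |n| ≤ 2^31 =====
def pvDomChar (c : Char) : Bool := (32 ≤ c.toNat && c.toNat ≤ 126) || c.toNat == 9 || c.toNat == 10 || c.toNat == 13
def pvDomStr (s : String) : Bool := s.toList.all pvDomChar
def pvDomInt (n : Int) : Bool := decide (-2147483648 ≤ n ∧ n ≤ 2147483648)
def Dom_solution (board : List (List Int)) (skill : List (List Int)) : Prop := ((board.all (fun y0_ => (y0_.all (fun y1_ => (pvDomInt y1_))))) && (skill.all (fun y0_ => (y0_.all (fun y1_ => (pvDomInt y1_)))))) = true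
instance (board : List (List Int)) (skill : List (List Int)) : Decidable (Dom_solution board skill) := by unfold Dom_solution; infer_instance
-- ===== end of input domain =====

-- B replaces A's 2D difference array (+ two prefix-sum passes) by directly adding each skill's
-- value over its rectangle, then one counting pass (objective: simpler).  Both Pythons mutate
-- `board` in place identically on Pre_; the equivalence proved here is about the return value.

-- ===== PORT A =====
-- d[i][j] += v  on a list-of-lists (Python in-place row update)
def pvAdd2A (d : List (List Int)) (i j v : Int) : List (List Int) :=
  let row := PySem.List.pyGetD d i []
  PySem.List.pySetD d i (PySem.List.pySetD row j (PySem.List.pyGetD row j 0 + v))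

def solution (board : List (List Int)) (skill : List (List Int)) : Int :=
  let N : Int := board.length
  let M : Int := (PySem.List.pyGetD board 0 []).length
  let damage : List (List Int) := List.replicate (N.toNat + 1) (List.replicate (M.toNat + 1) 0)
  let damage := skill.foldl (fun d s =>
    match s with
    | [t, r1, c1, r2, c2, degree] =>
      let value := if t == 1 then -degree else degree
      let d := pvAdd2A d r1 c1 value
      let d := pvAdd2A d r1 (c2 + 1) (-value)
      let d := pvAdd2A d (r2 + 1) c1 (-value)
      pvAdd2A d (r2 + 1) (c2 + 1) value
    | _ => d) damage
  let damage := (PySem.List.pyRange 0 N 1).foldl (fun d i =>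
    (PySem.List.pyRange 0 M 1).foldl (fun d j =>
      pvAdd2A d i (j + 1) (PySem.List.pyGetD (PySem.List.pyGetD d i []) j 0)) d) damage
  let damage := (PySem.List.pyRange 0 M 1).foldl (fun d j =>
    (PySem.List.pyRange 0 N 1).foldl (fun d i =>
      pvAdd2A d (i + 1) j (PySem.List.pyGetD (PySem.List.pyGetD d i []) j 0)) d) damage
  (PySem.List.pyRange 0 N 1).foldl (fun a i =>
    (PySem.List.pyRange 0 M 1).foldl (fun a j =>
      let b := PySem.List.pyGetD (PySem.List.pyGetD board i []) j 0 +
               PySem.List.pyGetD (PySem.List.pyGetD damage i []) j 0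
      if b > 0 then a + 1 else a) a) 0

-- ===== PORT B =====
-- bd[r][c] += v  on a list-of-lists (Python in-place row update)
def pvAdd2B (d : List (List Int)) (i j v : Int) : List (List Int) :=
  let row := PySem.List.pyGetD d i []
  PySem.List.pySetD d i (PySem.List.pySetD row j (PySem.List.pyGetD row j 0 + v))

def solution_alt (board : List (List Int)) (skill : List (List Int)) : Int :=
  let M : Int := (PySem.List.pyGetD board 0 []).length
  let board := skill.foldl (fun bd s =>
    -- Python's 6-way unpacking, ported as explicit index reads (exact: on rows of any
    -- other length Python raises ValueError, which Pre_ excludes; there bd is returned)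
    if s.length == 6 then
      let t := s.getD 0 0
      let r1 := s.getD 1 0
      let c1 := s.getD 2 0
      let r2 := s.getD 3 0
      let c2 := s.getD 4 0
      let degree := s.getD 5 0
      let value := if t == 1 then -degree else degree
      (PySem.List.pyRange r1 (r2 + 1) 1).foldl (fun bd r =>
        (PySem.List.pyRange c1 (c2 + 1) 1).foldl (fun bd c =>
          pvAdd2B bd r c value) bd) bd
    else bd) board
  (PySem.List.pyRange 0 (board.length : Int) 1).foldl (fun a i =>
    (PySem.List.pyRange 0 M 1).foldl (fun a j =>
      if PySem.List.pyGetD (PySem.List.pyGetD board i []) j 0 > 0 then a + 1 else a) a) 0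

-- ===== PRECONDITION & SPEC =====
-- Pre_ is the problem's natural domain (non-empty board, every row at least as wide as the first,
-- each skill a 6-tuple whose rectangle is well-formed and in bounds); outside it A raises or
-- returns accidental values from negative-index wraparound / inverted rectangles in the
-- difference array, while B applies the skills to the cells its ranges actually name.
def Pre_solution (board : List (List Int)) (skill : List (List Int)) : Prop :=
  board ≠ [] ∧
  (∀ row ∈ board, (board.getD 0 []).length ≤ row.length) ∧
  (∀ s ∈ skill, s.length = 6 ∧
    0 ≤ s.getD 1 0 ∧ s.getD 1 0 ≤ s.getD 3 0 ∧ s.getD 3 0 < (board.length : Int) ∧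
    0 ≤ s.getD 2 0 ∧ s.getD 2 0 ≤ s.getD 4 0 ∧ s.getD 4 0 < ((board.getD 0 []).length : Int))
instance (board : List (List Int)) (skill : List (List Int)) : Decidable (Pre_solution board skill) := by
  unfold Pre_solution; infer_instance

def pvWitness_solution : List (List Int) × List (List Int) := ([[1]], [[1, 0, 0, 0, 0, 1]])

def Spec_solution (board : List (List Int)) (skill : List (List Int)) (out : Int) : Prop := out = solution_alt board skill
instance (board : List (List Int)) (skill : List (List Int)) (out : Int) : Decidable (Spec_solution board skill out) := by unfold Spec_solution; infer_instance

-- ===== CLAIM (what is proved, stated in full; the proofs are below) =====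
def Claim_equal_solution : Prop := ∀ (board : List (List Int)) (skill : List (List Int)), Dom_solution board skill → Pre_solution board skill → Spec_solution board skill (solution board skill)

-- ===== LEMMAS AND PROOFS =====

-- matrix cell read (Nat indices, 0 outside)
def pvG (d : List (List Int)) (x y : Nat) : Int := (d.getD x []).getD y 0

lemma pvAdd2A_eq (d : List (List Int)) (i j : Int) (v : Int) (hi : 0 ≤ i) (hj : 0 ≤ j) :
    pvAdd2A d i j v =
      d.set i.toNat ((d.getD i.toNat []).set j.toNat ((d.getD i.toNat []).getD j.toNat 0 + v)) := by
  rw [pvAdd2A, show i = ((i.toNat : Nat) : Int) by omega, show j = ((j.toNat : Nat) : Int) by omega]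
  simp only [PySem.List.pySetD_natCast, PySem.List.pyGetD_natCast, Int.toNat_natCast]

lemma length_pvAdd2A (d : List (List Int)) (i j v : Int) (hi : 0 ≤ i) (hj : 0 ≤ j) :
    (pvAdd2A d i j v).length = d.length := by
  rw [pvAdd2A_eq d i j v hi hj]; simp

lemma pvG_pvAdd2A (d : List (List Int)) (i j v : Int) (hi : 0 ≤ i) (hj : 0 ≤ j)
    (hil : i.toNat < d.length) (hjl : j.toNat < (d.getD i.toNat []).length) (x y : Nat) :
    pvG (pvAdd2A d i j v) x y = pvG d x y + (if (x : Int) = i ∧ (y : Int) = j then v else 0) := by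
  rw [pvAdd2A_eq d i j v hi hj]
  unfold pvG
  by_cases hx : x = i.toNat
  · subst hx
    simp only [List.getD_eq_getElem?_getD, List.getElem?_set, if_pos rfl, hil, if_true]
    by_cases hy : y = j.toNat
    · subst hy
      have hjl' : j.toNat < (d[i.toNat]?.getD ([]:List Int)).length := by
        simpa [List.getD_eq_getElem?_getD] using hjl
      simp [List.getElem?_set, hjl', hi, hj]
    · simp [List.getElem?_set, Ne.symm hy]
      intro h1 h2; omega
  · simp [List.getD_eq_getElem?_getD, List.getElem?_set, Ne.symm hx]
    intro h1 h2; exfalso; apply hx; omega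

def pvRect (d : List (List Int)) (n m : Nat) : Prop := d.length = n ∧ ∀ row ∈ d, row.length = m

def pvWide (d : List (List Int)) (n m : Nat) : Prop := d.length = n ∧ ∀ row ∈ d, m ≤ row.length

lemma rowlen_of_pvRect {d : List (List Int)} {n m : Nat} (h : pvRect d n m) (x : Nat) (hx : x < n) :
    (d.getD x []).length = m := by
  obtain ⟨h1, h2⟩ := h
  rw [List.getD_eq_getElem?_getD, List.getElem?_eq_getElem (by omega)]
  exact h2 _ (List.getElem_mem _)

lemma rowlen_of_pvWide {d : List (List Int)} {n m : Nat} (h : pvWide d n m) (x : Nat) (hx : x < n) :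
    m ≤ (d.getD x []).length := by
  obtain ⟨h1, h2⟩ := h
  rw [List.getD_eq_getElem?_getD, List.getElem?_eq_getElem (by omega)]
  exact h2 _ (List.getElem_mem _)

lemma pvRect_pvAdd2A {d : List (List Int)} {n m : Nat} (h : pvRect d n m) (i j v : Int)
    (hi : 0 ≤ i) (hj : 0 ≤ j) : pvRect (pvAdd2A d i j v) n m := by
  obtain ⟨h1, h2⟩ := h
  refine ⟨by rw [length_pvAdd2A d i j v hi hj, h1], ?_⟩
  rw [pvAdd2A_eq d i j v hi hj]
  by_cases hil : i.toNat < d.length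
  · intro row hrow
    rcases List.mem_or_eq_of_mem_set hrow with h | h
    · exact h2 _ h
    · subst h
      rw [List.length_set, List.getD_eq_getElem?_getD, List.getElem?_eq_getElem hil]
      exact h2 _ (List.getElem_mem _)
  · rw [List.set_eq_of_length_le (by omega)]
    exact h2

lemma pvWide_pvAdd2A {d : List (List Int)} {n m : Nat} (h : pvWide d n m) (i j v : Int)
    (hi : 0 ≤ i) (hj : 0 ≤ j) : pvWide (pvAdd2A d i j v) n m := by
  obtain ⟨h1, h2⟩ := h
  refine ⟨by rw [length_pvAdd2A d i j v hi hj, h1], ?_⟩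
  rw [pvAdd2A_eq d i j v hi hj]
  by_cases hil : i.toNat < d.length
  · intro row hrow
    rcases List.mem_or_eq_of_mem_set hrow with h | h
    · exact h2 _ h
    · subst h
      rw [List.length_set, List.getD_eq_getElem?_getD, List.getElem?_eq_getElem hil]
      exact h2 _ (List.getElem_mem _)
  · rw [List.set_eq_of_length_le (by omega)]
    exact h2

def pvE (x : Nat) (a : Int) : Int := if (x : Int) = a then 1 else 0

lemma sum_pvE (x : Nat) (a : Int) :
    (∑ k ∈ Finset.range (x + 1), pvE k a) = if 0 ≤ a ∧ a ≤ (x : Int) then 1 else 0 := by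
  induction x with
  | zero =>
    rw [Finset.sum_range_one]
    simp only [pvE, Nat.cast_zero]
    split_ifs <;> omega
  | succ n ih =>
    rw [Finset.sum_range_succ, ih]
    simp only [pvE]
    split_ifs <;> push_cast <;> omega

lemma sum_swap_list {β : Type} (F : Finset Nat) (l : List β) (f : Nat → β → Int) :
    (∑ a ∈ F, (l.map (f a)).sum) = (l.map (fun b => ∑ a ∈ F, f a b)).sum := by
  induction l with
  | nil => simp
  | cons x xs ih => simp [List.map_cons, List.sum_cons, Finset.sum_add_distrib, ih]

lemma six_destruct (s : List Int) (h : s.length = 6) :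
    ∃ a b c d e f, s = [a, b, c, d, e, f] := by
  rcases s with _ | ⟨a, _ | ⟨b, _ | ⟨c, _ | ⟨d, _ | ⟨e, _ | ⟨f, _ | ⟨g, t⟩⟩⟩⟩⟩⟩⟩ <;>
    simp_all

lemma pyGetD2_eq_pvG (d : List (List Int)) (i j : Int) (hi : 0 ≤ i) (hj : 0 ≤ j) :
    PySem.List.pyGetD (PySem.List.pyGetD d i []) j 0 = pvG d i.toNat j.toNat := by
  rw [show i = ((i.toNat : Nat) : Int) by omega, show j = ((j.toNat : Nat) : Int) by omega]
  simp only [PySem.List.pyGetD_natCast, Int.toNat_natCast]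
  rfl

def pvStepA (d : List (List Int)) (s : List Int) : List (List Int) :=
  match s with
  | [t, r1, c1, r2, c2, degree] =>
    let value := if t == 1 then -degree else degree
    let d := pvAdd2A d r1 c1 value
    let d := pvAdd2A d r1 (c2 + 1) (-value)
    let d := pvAdd2A d (r2 + 1) c1 (-value)
    pvAdd2A d (r2 + 1) (c2 + 1) value
  | _ => d

def pvVal (s : List Int) : Int := if s.getD 0 0 == 1 then -(s.getD 5 0) else s.getD 5 0

def pvDelta (s : List Int) (x y : Nat) : Int :=
  pvVal s * (pvE x (s.getD 1 0) - pvE x (s.getD 3 0 + 1)) *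
    (pvE y (s.getD 2 0) - pvE y (s.getD 4 0 + 1))

def pvBnd (s : List Int) (n m : Nat) : Prop :=
  s.length = 6 ∧ 0 ≤ s.getD 1 0 ∧ s.getD 1 0 ≤ s.getD 3 0 ∧ s.getD 3 0 < (n : Int) ∧
  0 ≤ s.getD 2 0 ∧ s.getD 2 0 ≤ s.getD 4 0 ∧ s.getD 4 0 < (m : Int)

lemma pvG_pvAdd2A_rect {d : List (List Int)} {n m : Nat} (h : pvRect d (n + 1) (m + 1))
    {i j : Int} (v : Int) (hi : 0 ≤ i) (hin : i ≤ (n : Int)) (hj : 0 ≤ j) (hjm : j ≤ (m : Int))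
    (x y : Nat) :
    pvG (pvAdd2A d i j v) x y = pvG d x y + (if (x : Int) = i ∧ (y : Int) = j then v else 0) := by
  have hl := h.1
  have hrow := rowlen_of_pvRect h i.toNat (by omega)
  exact pvG_pvAdd2A d i j v hi hj (by omega) (by omega) x y

lemma pvRect_stepA {d : List (List Int)} {n m : Nat} (h : pvRect d (n + 1) (m + 1))
    {s : List Int} (hs : pvBnd s n m) : pvRect (pvStepA d s) (n + 1) (m + 1) := by
  obtain ⟨hlen, hb⟩ := hs
  obtain ⟨t, r1, c1, r2, c2, dg, rfl⟩ := six_destruct s hlen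
  simp only [List.getD, List.getElem?_cons_zero, List.getElem?_cons_succ, Option.getD_some] at hb
  obtain ⟨hr1, hr12, hr2, hc1, hc12, hc2⟩ := hb
  simp only [pvStepA]
  have h1 := pvRect_pvAdd2A h r1 c1 (if t == 1 then -dg else dg) (by omega) (by omega)
  have h2 := pvRect_pvAdd2A h1 r1 (c2 + 1) (-(if t == 1 then -dg else dg)) (by omega) (by omega)
  have h3 := pvRect_pvAdd2A h2 (r2 + 1) c1 (-(if t == 1 then -dg else dg)) (by omega) (by omega)
  exact pvRect_pvAdd2A h3 (r2 + 1) (c2 + 1) (if t == 1 then -dg else dg) (by omega) (by omega)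

lemma pvG_stepA {d : List (List Int)} {n m : Nat} (h : pvRect d (n + 1) (m + 1))
    {s : List Int} (hs : pvBnd s n m) (x y : Nat) :
    pvG (pvStepA d s) x y = pvG d x y + pvDelta s x y := by
  obtain ⟨hlen, hb⟩ := hs
  obtain ⟨t, r1, c1, r2, c2, dg, rfl⟩ := six_destruct s hlen
  simp only [List.getD, List.getElem?_cons_zero, List.getElem?_cons_succ, Option.getD_some] at hb
  obtain ⟨hr1, hr12, hr2, hc1, hc12, hc2⟩ := hb
  have h1 := pvRect_pvAdd2A h r1 c1 (if t == 1 then -dg else dg) (by omega) (by omega)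
  have h2 := pvRect_pvAdd2A h1 r1 (c2 + 1) (-(if t == 1 then -dg else dg)) (by omega) (by omega)
  have h3 := pvRect_pvAdd2A h2 (r2 + 1) c1 (-(if t == 1 then -dg else dg)) (by omega) (by omega)
  simp only [pvStepA]
  rw [pvG_pvAdd2A_rect h3 _ (by omega) (by omega) (by omega) (by omega) x y,
      pvG_pvAdd2A_rect h2 _ (by omega) (by omega) (by omega) (by omega) x y,
      pvG_pvAdd2A_rect h1 _ (by omega) (by omega) (by omega) (by omega) x y,
      pvG_pvAdd2A_rect h _ (by omega) (by omega) (by omega) (by omega) x y]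
  have hsplit : ∀ (a b v : Int), (if (x : Int) = a ∧ (y : Int) = b then v else 0) =
      v * pvE x a * pvE y b := by
    intro a b v
    by_cases hx : (x : Int) = a <;> by_cases hy : (y : Int) = b <;>
      simp [pvE, hx, hy]
  rw [hsplit, hsplit, hsplit, hsplit]
  simp only [pvDelta, pvVal, List.getD, List.getElem?_cons_zero, List.getElem?_cons_succ,
    Option.getD_some]
  ring

lemma pvG_foldA {n m : Nat} (sk : List (List Int)) (d : List (List Int))
    (h : pvRect d (n + 1) (m + 1)) (hsk : ∀ s ∈ sk, pvBnd s n m) (x y : Nat) :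
    pvG (sk.foldl pvStepA d) x y = pvG d x y + (sk.map (fun s => pvDelta s x y)).sum := by
  induction sk generalizing d with
  | nil => simp
  | cons s rest ih =>
    rw [List.foldl_cons, List.map_cons, List.sum_cons,
      ih _ (pvRect_stepA h (hsk s (by simp))) (fun t ht => hsk t (by simp [ht])),
      pvG_stepA h (hsk s (by simp))]
    ring

lemma pvRect_foldA {n m : Nat} (sk : List (List Int)) (d : List (List Int))
    (h : pvRect d (n + 1) (m + 1)) (hsk : ∀ s ∈ sk, pvBnd s n m) :
    pvRect (sk.foldl pvStepA d) (n + 1) (m + 1) := by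
  induction sk generalizing d with
  | nil => simpa
  | cons s rest ih =>
    exact ih _ (pvRect_stepA h (hsk s (by simp))) (fun t ht => hsk t (by simp [ht]))

lemma pvRowH {n m : Nat} (i : Int) (hi0 : 0 ≤ i) (hin : i ≤ (n : Int)) :
    ∀ (t : Nat), t ≤ m → ∀ d : List (List Int), pvRect d (n + 1) (m + 1) →
      pvRect ((PySem.List.pyRange 0 (t : Int) 1).foldl
        (fun d j => pvAdd2A d i (j + 1) (PySem.List.pyGetD (PySem.List.pyGetD d i []) j 0)) d)
        (n + 1) (m + 1) ∧
      ∀ x y : Nat, pvG ((PySem.List.pyRange 0 (t : Int) 1).foldl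
        (fun d j => pvAdd2A d i (j + 1) (PySem.List.pyGetD (PySem.List.pyGetD d i []) j 0)) d) x y
        = if x = i.toNat ∧ y ≤ t then ∑ k ∈ Finset.range (y + 1), pvG d i.toNat k
          else pvG d x y := by
  intro t
  induction t with
  | zero =>
    intro _ d hd
    rw [show ((0 : Nat) : Int) = 0 from rfl, PySem.List.pyRange_one_eq_nil (le_refl 0)]
    refine ⟨hd, ?_⟩
    intro x y
    rw [List.foldl_nil]
    split_ifs with hc
    · obtain ⟨rfl, hy⟩ := hc
      interval_cases y
      rw [show (0 : Nat) + 1 = 1 from rfl, Finset.sum_range_one]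
    · rfl
  | succ t ih =>
    intro ht d hd
    have h1 := ih (by omega) d hd
    rw [show ((t + 1 : Nat) : Int) = (t : Int) + 1 by push_cast; ring,
        PySem.List.pyRange_one_succ_right (show (0:Int) ≤ (t:Int) by omega), List.foldl_append,
        List.foldl_cons, List.foldl_nil]
    -- the value read at (i, t)
    have hread : PySem.List.pyGetD (PySem.List.pyGetD ((PySem.List.pyRange 0 (t : Int) 1).foldl
        (fun d j => pvAdd2A d i (j + 1) (PySem.List.pyGetD (PySem.List.pyGetD d i []) j 0)) d) i [])
        (t : Int) 0 = ∑ k ∈ Finset.range (t + 1), pvG d i.toNat k := by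
      rw [pyGetD2_eq_pvG _ i (t : Int) hi0 (by omega)]
      have := h1.2 i.toNat t
      rw [if_pos ⟨rfl, le_refl t⟩] at this
      rw [show ((t : Int)).toNat = t from Int.toNat_natCast t, this]
    refine ⟨pvRect_pvAdd2A h1.1 i ((t : Int) + 1) _ hi0 (by omega), ?_⟩
    intro x y
    rw [pvG_pvAdd2A_rect h1.1 _ hi0 hin (by omega) (by push_cast; omega) x y, hread, h1.2 x y]
    by_cases hx : x = i.toNat
    · subst hx
      by_cases hy : y = t + 1
      · subst hy
        rw [if_neg (by omega), if_pos ⟨by omega, rfl⟩, if_pos ⟨rfl, by omega⟩,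
            Finset.sum_range_succ (fun k => pvG d i.toNat k) (t + 1)]
        ring
      · by_cases hy2 : y ≤ t
        · rw [if_pos ⟨rfl, hy2⟩, if_neg (by omega), if_pos ⟨rfl, by omega⟩]
          ring
        · rw [if_neg (by omega), if_neg (by omega), if_neg (by omega)]
          ring
    · rw [if_neg (by omega), if_neg (by omega), if_neg (by omega)]
      ring

lemma pvPassH {n m : Nat} :
    ∀ (t : Nat), t ≤ n → ∀ d : List (List Int), pvRect d (n + 1) (m + 1) →
      pvRect ((PySem.List.pyRange 0 (t : Int) 1).foldl (fun d i =>
        (PySem.List.pyRange 0 (m : Int) 1).foldl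
          (fun d j => pvAdd2A d i (j + 1) (PySem.List.pyGetD (PySem.List.pyGetD d i []) j 0)) d) d)
        (n + 1) (m + 1) ∧
      ∀ x y : Nat, pvG ((PySem.List.pyRange 0 (t : Int) 1).foldl (fun d i =>
        (PySem.List.pyRange 0 (m : Int) 1).foldl
          (fun d j => pvAdd2A d i (j + 1) (PySem.List.pyGetD (PySem.List.pyGetD d i []) j 0)) d) d) x y
        = if x < t ∧ y ≤ m then ∑ k ∈ Finset.range (y + 1), pvG d x k else pvG d x y := by
  intro t
  induction t with
  | zero =>
    intro _ d hd
    rw [show ((0 : Nat) : Int) = 0 from rfl, PySem.List.pyRange_one_eq_nil (le_refl 0)]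
    refine ⟨hd, fun x y => ?_⟩
    rw [List.foldl_nil, if_neg (by omega)]
  | succ t ih =>
    intro ht d hd
    have h1 := ih (by omega) d hd
    rw [show ((t + 1 : Nat) : Int) = (t : Int) + 1 by push_cast; ring,
        PySem.List.pyRange_one_succ_right (show (0:Int) ≤ (t:Int) by omega), List.foldl_append,
        List.foldl_cons, List.foldl_nil]
    have hrow := pvRowH (n := n) (m := m) (t : Int) (by omega) (by omega) m (le_refl m) _ h1.1
    refine ⟨hrow.1, fun x y => ?_⟩
    rw [hrow.2 x y]
    by_cases hx : x = t
    · subst hx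
      by_cases hy : y ≤ m
      · rw [if_pos ⟨by omega, hy⟩, if_pos ⟨by omega, hy⟩]
        refine Finset.sum_congr rfl (fun k _ => ?_)
        rw [h1.2, if_neg (by omega)]
        rw [Int.toNat_natCast]
      · rw [if_neg (by omega), if_neg (by omega), h1.2, if_neg (by omega)]
    · rw [if_neg (by omega), h1.2]
      by_cases hx2 : x < t
      · by_cases hy : y ≤ m
        · rw [if_pos ⟨hx2, hy⟩, if_pos ⟨by omega, hy⟩]
        · rw [if_neg (by omega), if_neg (by omega)]
      · rw [if_neg (by omega), if_neg (by omega)]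

lemma pvColV {n m : Nat} (j : Int) (hj0 : 0 ≤ j) (hjm : j ≤ (m : Int)) :
    ∀ (t : Nat), t ≤ n → ∀ d : List (List Int), pvRect d (n + 1) (m + 1) →
      pvRect ((PySem.List.pyRange 0 (t : Int) 1).foldl
        (fun d i => pvAdd2A d (i + 1) j (PySem.List.pyGetD (PySem.List.pyGetD d i []) j 0)) d)
        (n + 1) (m + 1) ∧
      ∀ x y : Nat, pvG ((PySem.List.pyRange 0 (t : Int) 1).foldl
        (fun d i => pvAdd2A d (i + 1) j (PySem.List.pyGetD (PySem.List.pyGetD d i []) j 0)) d) x y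
        = if y = j.toNat ∧ x ≤ t then ∑ k ∈ Finset.range (x + 1), pvG d k j.toNat
          else pvG d x y := by
  intro t
  induction t with
  | zero =>
    intro _ d hd
    rw [show ((0 : Nat) : Int) = 0 from rfl, PySem.List.pyRange_one_eq_nil (le_refl 0)]
    refine ⟨hd, fun x y => ?_⟩
    rw [List.foldl_nil]
    split_ifs with hc
    · obtain ⟨rfl, hx⟩ := hc
      interval_cases x
      rw [show (0 : Nat) + 1 = 1 from rfl, Finset.sum_range_one]
    · rfl
  | succ t ih =>
    intro ht d hd
    have h1 := ih (by omega) d hd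
    rw [show ((t + 1 : Nat) : Int) = (t : Int) + 1 by push_cast; ring,
        PySem.List.pyRange_one_succ_right (show (0:Int) ≤ (t:Int) by omega), List.foldl_append,
        List.foldl_cons, List.foldl_nil]
    have hread : PySem.List.pyGetD (PySem.List.pyGetD ((PySem.List.pyRange 0 (t : Int) 1).foldl
        (fun d i => pvAdd2A d (i + 1) j (PySem.List.pyGetD (PySem.List.pyGetD d i []) j 0)) d)
        (t : Int) []) j 0 = ∑ k ∈ Finset.range (t + 1), pvG d k j.toNat := by
      rw [pyGetD2_eq_pvG _ (t : Int) j (by omega) hj0]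
      have := h1.2 ((t : Int)).toNat j.toNat
      rw [if_pos ⟨rfl, by omega⟩] at this
      rw [this, Int.toNat_natCast]
    refine ⟨pvRect_pvAdd2A h1.1 ((t : Int) + 1) j _ (by omega) hj0, fun x y => ?_⟩
    rw [pvG_pvAdd2A_rect h1.1 _ (by omega) (by push_cast; omega) hj0 hjm x y, hread, h1.2 x y]
    by_cases hy : y = j.toNat
    · subst hy
      by_cases hx : x = t + 1
      · subst hx
        rw [if_neg (by omega), if_pos ⟨by push_cast; omega, by omega⟩, if_pos ⟨rfl, by omega⟩,
            Finset.sum_range_succ (fun k => pvG d k j.toNat) (t + 1)]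
        ring
      · by_cases hx2 : x ≤ t
        · rw [if_pos ⟨rfl, hx2⟩, if_neg (by push_cast; omega), if_pos ⟨rfl, by omega⟩]
          ring
        · rw [if_neg (by omega), if_neg (by push_cast; omega), if_neg (by omega)]
          ring
    · rw [if_neg (by omega), if_neg (fun hc => hy (by push_cast at hc; omega)), if_neg (by omega)]
      ring

lemma pvPassV {n m : Nat} :
    ∀ (t : Nat), t ≤ m → ∀ d : List (List Int), pvRect d (n + 1) (m + 1) →
      pvRect ((PySem.List.pyRange 0 (t : Int) 1).foldl (fun d j =>
        (PySem.List.pyRange 0 (n : Int) 1).foldl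
          (fun d i => pvAdd2A d (i + 1) j (PySem.List.pyGetD (PySem.List.pyGetD d i []) j 0)) d) d)
        (n + 1) (m + 1) ∧
      ∀ x y : Nat, pvG ((PySem.List.pyRange 0 (t : Int) 1).foldl (fun d j =>
        (PySem.List.pyRange 0 (n : Int) 1).foldl
          (fun d i => pvAdd2A d (i + 1) j (PySem.List.pyGetD (PySem.List.pyGetD d i []) j 0)) d) d) x y
        = if y < t ∧ x ≤ n then ∑ k ∈ Finset.range (x + 1), pvG d k y else pvG d x y := by
  intro t
  induction t with
  | zero =>
    intro _ d hd
    rw [show ((0 : Nat) : Int) = 0 from rfl, PySem.List.pyRange_one_eq_nil (le_refl 0)]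
    refine ⟨hd, fun x y => ?_⟩
    rw [List.foldl_nil, if_neg (by omega)]
  | succ t ih =>
    intro ht d hd
    have h1 := ih (by omega) d hd
    rw [show ((t + 1 : Nat) : Int) = (t : Int) + 1 by push_cast; ring,
        PySem.List.pyRange_one_succ_right (show (0:Int) ≤ (t:Int) by omega), List.foldl_append,
        List.foldl_cons, List.foldl_nil]
    have hcol := pvColV (n := n) (m := m) (t : Int) (by omega) (by omega) n (le_refl n) _ h1.1
    refine ⟨hcol.1, fun x y => ?_⟩
    rw [hcol.2 x y]
    by_cases hy : y = t
    · subst hy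
      by_cases hx : x ≤ n
      · rw [Int.toNat_natCast, if_pos ⟨rfl, hx⟩, if_pos ⟨by omega, hx⟩]
        refine Finset.sum_congr rfl (fun k _ => ?_)
        rw [h1.2, if_neg (by omega)]
      · rw [Int.toNat_natCast, if_neg (by omega), if_neg (by omega), h1.2, if_neg (by omega)]
    · rw [Int.toNat_natCast, if_neg (fun hc => hy hc.1), h1.2]
      by_cases hy2 : y < t
      · by_cases hx : x ≤ n
        · rw [if_pos ⟨hy2, hx⟩, if_pos ⟨by omega, hx⟩]
        · rw [if_neg (by omega), if_neg (by omega)]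
      · rw [if_neg (by omega), if_neg (by omega)]

lemma pvG_pvAdd2A_wide {bd : List (List Int)} {n m : Nat} (h : pvWide bd n m) {i j : Int}
    (v : Int) (hi : 0 ≤ i) (hin : i < (n : Int)) (hj : 0 ≤ j) (hjm : j < (m : Int)) (x y : Nat) :
    pvG (pvAdd2A bd i j v) x y = pvG bd x y + (if (x : Int) = i ∧ (y : Int) = j then v else 0) := by
  have hl := h.1
  have hrow := rowlen_of_pvWide h i.toNat (by omega)
  exact pvG_pvAdd2A bd i j v hi hj (by omega) (by omega) x y

lemma pvRowB {n m : Nat} (r v : Int) (hr0 : 0 ≤ r) (hrn : r < (n : Int)) (b2 : Int)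
    (hb2 : b2 ≤ (m : Int)) :
    ∀ (k : Nat) (a : Int), (b2 - a).toNat = k → 0 ≤ a → ∀ bd : List (List Int), pvWide bd n m →
      pvWide ((PySem.List.pyRange a b2 1).foldl (fun bd c => pvAdd2A bd r c v) bd) n m ∧
      ∀ x y : Nat, pvG ((PySem.List.pyRange a b2 1).foldl (fun bd c => pvAdd2A bd r c v) bd) x y
        = pvG bd x y + (if (x : Int) = r ∧ a ≤ (y : Int) ∧ (y : Int) < b2 then v else 0) := by
  intro k
  induction k with
  | zero =>
    intro a hk ha bd hw
    rw [PySem.List.pyRange_one_eq_nil (by omega)]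
    refine ⟨hw, fun x y => ?_⟩
    rw [List.foldl_nil, if_neg (by omega)]
    ring
  | succ k ih =>
    intro a hk ha bd hw
    rw [PySem.List.pyRange_one_cons (by omega), List.foldl_cons]
    have hw1 := pvWide_pvAdd2A hw r a v hr0 ha
    have h1 := ih (a + 1) (by omega) (by omega) _ hw1
    refine ⟨h1.1, fun x y => ?_⟩
    rw [h1.2 x y, pvG_pvAdd2A_wide hw v hr0 hrn ha (by omega) x y]
    have hab : a < b2 := by omega
    have key : (if (x : Int) = r ∧ (y : Int) = a then v else 0)
        + (if (x : Int) = r ∧ a + 1 ≤ (y : Int) ∧ (y : Int) < b2 then v else 0)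
        = (if (x : Int) = r ∧ a ≤ (y : Int) ∧ (y : Int) < b2 then v else 0) := by
      by_cases hA : (x : Int) = r
      · by_cases hB : (y : Int) = a
        · rw [if_pos ⟨hA, hB⟩, if_neg (fun hc => by omega), if_pos ⟨hA, by omega, by omega⟩]
          ring
        · by_cases hC : a + 1 ≤ (y : Int) ∧ (y : Int) < b2
          · rw [if_neg (fun hc => hB hc.2), if_pos ⟨hA, hC⟩, if_pos ⟨hA, by omega, by omega⟩]
            ring
          · rw [if_neg (fun hc => hB hc.2), if_neg (fun hc => hC ⟨hc.2.1, hc.2.2⟩),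
                if_neg (fun hc => hC ⟨by omega, hc.2.2⟩)]
            ring
      · rw [if_neg (fun hc => hA hc.1), if_neg (fun hc => hA hc.1), if_neg (fun hc => hA hc.1)]
        ring
    rw [add_assoc, key]

def pvStepB (bd : List (List Int)) (s : List Int) : List (List Int) :=
  if s.length == 6 then
    let t := s.getD 0 0
    let r1 := s.getD 1 0
    let c1 := s.getD 2 0
    let r2 := s.getD 3 0
    let c2 := s.getD 4 0
    let degree := s.getD 5 0
    let value := if t == 1 then -degree else degree
    (PySem.List.pyRange r1 (r2 + 1) 1).foldl (fun bd r =>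
      (PySem.List.pyRange c1 (c2 + 1) 1).foldl (fun bd c =>
        pvAdd2A bd r c value) bd) bd
  else bd

def pvHit (s : List Int) (x y : Nat) : Int :=
  pvVal s * (if s.getD 1 0 ≤ (x : Int) ∧ (x : Int) ≤ s.getD 3 0 then 1 else 0) *
    (if s.getD 2 0 ≤ (y : Int) ∧ (y : Int) ≤ s.getD 4 0 then 1 else 0)

lemma pvHit_eq (s : List Int) (x y : Nat) :
    pvHit s x y = pvVal s *
      ((if s.getD 1 0 ≤ (x : Int) then (1:Int) else 0) *
       (if (x : Int) ≤ s.getD 3 0 then (1:Int) else 0)) *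
      ((if s.getD 2 0 ≤ (y : Int) then (1:Int) else 0) *
       (if (y : Int) ≤ s.getD 4 0 then (1:Int) else 0)) := by
  unfold pvHit
  generalize pvVal s = V
  generalize s.getD 1 0 = A
  generalize s.getD 3 0 = B
  generalize s.getD 2 0 = C
  generalize s.getD 4 0 = D
  by_cases h1 : A ≤ (x : Int) <;> by_cases h2 : (x : Int) ≤ B <;>
    by_cases h3 : C ≤ (y : Int) <;> by_cases h4 : (y : Int) ≤ D <;>
      { simp [h1, h2, h3, h4]; try ring }

lemma pvBoxB {n m : Nat} (v c1 c2 : Int) (hc1 : 0 ≤ c1) (hc2 : c2 < (m : Int)) (b1 : Int)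
    (hb1 : b1 ≤ (n : Int)) :
    ∀ (k : Nat) (a : Int), (b1 - a).toNat = k → 0 ≤ a → ∀ bd : List (List Int), pvWide bd n m →
      pvWide ((PySem.List.pyRange a b1 1).foldl (fun bd r =>
        (PySem.List.pyRange c1 (c2 + 1) 1).foldl (fun bd c => pvAdd2A bd r c v) bd) bd) n m ∧
      ∀ x y : Nat, pvG ((PySem.List.pyRange a b1 1).foldl (fun bd r =>
        (PySem.List.pyRange c1 (c2 + 1) 1).foldl (fun bd c => pvAdd2A bd r c v) bd) bd) x y
        = pvG bd x y +
          (if (a ≤ (x : Int) ∧ (x : Int) < b1) ∧ (c1 ≤ (y : Int) ∧ (y : Int) ≤ c2) then v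
           else 0) := by
  intro k
  induction k with
  | zero =>
    intro a hk ha bd hw
    rw [PySem.List.pyRange_one_eq_nil (show b1 ≤ a by omega)]
    refine ⟨hw, fun x y => ?_⟩
    rw [List.foldl_nil, if_neg (by omega)]
    ring
  | succ k ih =>
    intro a hk ha bd hw
    have hab : a < b1 := by omega
    rw [PySem.List.pyRange_one_cons hab, List.foldl_cons]
    have hrow := pvRowB a v ha (by omega) (c2 + 1) (by omega)
      ((c2 + 1 - c1).toNat) c1 rfl hc1 bd hw
    have h1 := ih (a + 1) (by omega) (by omega) _ hrow.1
    refine ⟨h1.1, fun x y => ?_⟩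
    rw [h1.2 x y, hrow.2 x y, add_assoc]
    congr 1
    by_cases hB : c1 ≤ (y : Int) ∧ (y : Int) ≤ c2
    · by_cases hA : (x : Int) = a
      · rw [if_pos ⟨hA, hB.1, by omega⟩, if_neg (by omega), if_pos ⟨⟨by omega, by omega⟩, hB⟩]
        ring
      · by_cases hA2 : a + 1 ≤ (x : Int) ∧ (x : Int) < b1
        · rw [if_neg (fun hc => hA hc.1), if_pos ⟨hA2, hB⟩, if_pos ⟨⟨by omega, by omega⟩, hB⟩]
          ring
        · rw [if_neg (fun hc => hA hc.1), if_neg (fun hc => hA2 hc.1),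
              if_neg (fun hc => hA2 ⟨by omega, hc.1.2⟩)]
          ring
    · rw [if_neg (fun hc => hB ⟨hc.2.1, by omega⟩), if_neg (fun hc => hB hc.2),
          if_neg (fun hc => hB hc.2)]
      ring

lemma pvWide_stepB {bd : List (List Int)} {n m : Nat} (h : pvWide bd n m)
    {s : List Int} (hs : pvBnd s n m) : pvWide (pvStepB bd s) n m := by
  obtain ⟨hlen, hb⟩ := hs
  obtain ⟨t, r1, c1, r2, c2, dg, rfl⟩ := six_destruct s hlen
  simp only [List.getD, List.getElem?_cons_zero, List.getElem?_cons_succ, Option.getD_some] at hb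
  obtain ⟨hr1, hr12, hr2, hc1, hc12, hc2⟩ := hb
  simp only [pvStepB, List.length_cons, List.length_nil, List.getD, List.getElem?_cons_zero,
    List.getElem?_cons_succ, Option.getD_some]
  norm_num
  exact (pvBoxB _ c1 c2 hc1 (by omega) (r2 + 1) (by omega)
    ((r2 + 1 - r1).toNat) r1 rfl hr1 bd h).1

lemma pvG_stepB {bd : List (List Int)} {n m : Nat} (h : pvWide bd n m)
    {s : List Int} (hs : pvBnd s n m) (x y : Nat) :
    pvG (pvStepB bd s) x y = pvG bd x y + pvHit s x y := by
  obtain ⟨hlen, hb⟩ := hs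
  obtain ⟨t, r1, c1, r2, c2, dg, rfl⟩ := six_destruct s hlen
  simp only [List.getD, List.getElem?_cons_zero, List.getElem?_cons_succ, Option.getD_some] at hb
  obtain ⟨hr1, hr12, hr2, hc1, hc12, hc2⟩ := hb
  simp only [pvStepB, List.length_cons, List.length_nil, List.getD, List.getElem?_cons_zero,
    List.getElem?_cons_succ, Option.getD_some]
  norm_num
  rw [(pvBoxB _ c1 c2 hc1 (by omega) (r2 + 1) (by omega)
    ((r2 + 1 - r1).toNat) r1 rfl hr1 bd h).2 x y]
  congr 1
  simp only [pvHit, pvVal, List.getD, List.getElem?_cons_zero, List.getElem?_cons_succ,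
    Option.getD_some]
  have e : ((r1 ≤ (x : Int) ∧ (x : Int) < r2 + 1) ∧ (c1 ≤ (y : Int) ∧ (y : Int) ≤ c2)) ↔
      ((r1 ≤ (x : Int) ∧ (x : Int) ≤ r2) ∧ (c1 ≤ (y : Int) ∧ (y : Int) ≤ c2)) := by omega
  rw [if_congr e rfl rfl]
  by_cases hA : r1 ≤ (x : Int) ∧ (x : Int) ≤ r2 <;>
    by_cases hB : c1 ≤ (y : Int) ∧ (y : Int) ≤ c2 <;>
      simp [hA, hB]

lemma pvG_foldB {n m : Nat} (sk : List (List Int)) (bd : List (List Int))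
    (h : pvWide bd n m) (hsk : ∀ s ∈ sk, pvBnd s n m) (x y : Nat) :
    pvG (sk.foldl pvStepB bd) x y = pvG bd x y + (sk.map (fun s => pvHit s x y)).sum := by
  induction sk generalizing bd with
  | nil => simp
  | cons s rest ih =>
    rw [List.foldl_cons, List.map_cons, List.sum_cons,
      ih _ (pvWide_stepB h (hsk s (by simp))) (fun t ht => hsk t (by simp [ht])),
      pvG_stepB h (hsk s (by simp))]
    ring

lemma pvWide_foldB {n m : Nat} (sk : List (List Int)) (bd : List (List Int))
    (h : pvWide bd n m) (hsk : ∀ s ∈ sk, pvBnd s n m) :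
    pvWide (sk.foldl pvStepB bd) n m := by
  induction sk generalizing bd with
  | nil => simpa
  | cons s rest ih =>
    exact ih _ (pvWide_stepB h (hsk s (by simp))) (fun t ht => hsk t (by simp [ht]))

lemma pvTelescope {n m : Nat} {s : List Int} (hs : pvBnd s n m) (x y : Nat) :
    (∑ k ∈ Finset.range (x + 1), ∑ l ∈ Finset.range (y + 1), pvDelta s k l) = pvHit s x y := by
  obtain ⟨hlen, hb⟩ := hs
  obtain ⟨t, r1, c1, r2, c2, dg, rfl⟩ := six_destruct s hlen
  simp only [List.getD, List.getElem?_cons_zero, List.getElem?_cons_succ, Option.getD_some] at hb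
  obtain ⟨hr1, hr12, hr2, hc1, hc12, hc2⟩ := hb
  rw [pvHit_eq]
  simp only [pvDelta, pvVal, List.getD, List.getElem?_cons_zero, List.getElem?_cons_succ,
    Option.getD_some]
  have hin : ∀ k : Nat, (∑ l ∈ Finset.range (y + 1),
      (if (t == 1) = true then -dg else dg) * (pvE k r1 - pvE k (r2 + 1)) *
        (pvE l c1 - pvE l (c2 + 1)))
      = (if (t == 1) = true then -dg else dg) * (pvE k r1 - pvE k (r2 + 1)) *
        ((if 0 ≤ c1 ∧ c1 ≤ (y : Int) then (1:Int) else 0) -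
         (if 0 ≤ c2 + 1 ∧ c2 + 1 ≤ (y : Int) then (1:Int) else 0)) := by
    intro k
    rw [← Finset.mul_sum, Finset.sum_sub_distrib, sum_pvE, sum_pvE]
  rw [Finset.sum_congr rfl (fun k _ => hin k)]
  have hout : (∑ k ∈ Finset.range (x + 1),
      (if (t == 1) = true then -dg else dg) * (pvE k r1 - pvE k (r2 + 1)) *
        ((if 0 ≤ c1 ∧ c1 ≤ (y : Int) then (1:Int) else 0) -
         (if 0 ≤ c2 + 1 ∧ c2 + 1 ≤ (y : Int) then (1:Int) else 0)))
      = (if (t == 1) = true then -dg else dg) *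
        ((if 0 ≤ r1 ∧ r1 ≤ (x : Int) then (1:Int) else 0) -
         (if 0 ≤ r2 + 1 ∧ r2 + 1 ≤ (x : Int) then (1:Int) else 0)) *
        ((if 0 ≤ c1 ∧ c1 ≤ (y : Int) then (1:Int) else 0) -
         (if 0 ≤ c2 + 1 ∧ c2 + 1 ≤ (y : Int) then (1:Int) else 0)) := by
    have : ∀ k : Nat, (if (t == 1) = true then -dg else dg) * (pvE k r1 - pvE k (r2 + 1)) *
        ((if 0 ≤ c1 ∧ c1 ≤ (y : Int) then (1:Int) else 0) -
         (if 0 ≤ c2 + 1 ∧ c2 + 1 ≤ (y : Int) then (1:Int) else 0))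
        = ((if (t == 1) = true then -dg else dg) *
           ((if 0 ≤ c1 ∧ c1 ≤ (y : Int) then (1:Int) else 0) -
            (if 0 ≤ c2 + 1 ∧ c2 + 1 ≤ (y : Int) then (1:Int) else 0))) *
          (pvE k r1 - pvE k (r2 + 1)) := fun k => by ring
    rw [Finset.sum_congr rfl (fun k _ => this k), ← Finset.mul_sum,
        Finset.sum_sub_distrib, sum_pvE, sum_pvE]
    ring
  rw [hout]
  have e1 : (0 ≤ r1 ∧ r1 ≤ (x : Int)) ↔ r1 ≤ (x : Int) := by omega
  have e2 : (0 ≤ r2 + 1 ∧ r2 + 1 ≤ (x : Int)) ↔ r2 + 1 ≤ (x : Int) := by omega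
  have e3 : (0 ≤ c1 ∧ c1 ≤ (y : Int)) ↔ c1 ≤ (y : Int) := by omega
  have e4 : (0 ≤ c2 + 1 ∧ c2 + 1 ≤ (y : Int)) ↔ c2 + 1 ≤ (y : Int) := by omega
  rw [if_congr e1 rfl rfl, if_congr e2 rfl rfl, if_congr e3 rfl rfl, if_congr e4 rfl rfl]
  clear hin hout hlen e1 e2 e3 e4
  split_ifs <;> (try ring) <;> omega

lemma pvRect_replicate (n m : Nat) :
    pvRect (List.replicate (n + 1) (List.replicate (m + 1) (0:Int))) (n + 1) (m + 1) := by
  refine ⟨by simp, fun row hrow => ?_⟩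
  rw [List.eq_of_mem_replicate hrow]
  simp

lemma pvG_replicate (n m : Nat) (x y : Nat) :
    pvG (List.replicate (n + 1) (List.replicate (m + 1) (0:Int))) x y = 0 := by
  unfold pvG
  by_cases hx : x < n + 1 <;> by_cases hy : y < m + 1 <;>
    simp [List.getD_eq_getElem?_getD, List.getElem?_replicate, hx, hy]


-- ===== VERDICT (by name: the statement is the Claim_ definition above) =====
theorem solution_spec : Claim_equal_solution := by
  unfold Claim_equal_solution Spec_solution
  intro board skill _ hpre
  obtain ⟨-, hrows, hsk⟩ := hpre
  -- abbreviations
  have hstepA : (fun (d : List (List Int)) (s : List Int) =>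
      match s with
      | [t, r1, c1, r2, c2, degree] =>
        let value := if t == 1 then -degree else degree
        let d := pvAdd2A d r1 c1 value
        let d := pvAdd2A d r1 (c2 + 1) (-value)
        let d := pvAdd2A d (r2 + 1) c1 (-value)
        pvAdd2A d (r2 + 1) (c2 + 1) value
      | _ => d) = pvStepA := rfl
  have hstepB : (fun (bd : List (List Int)) (s : List Int) =>
      if s.length == 6 then
        let t := s.getD 0 0
        let r1 := s.getD 1 0
        let c1 := s.getD 2 0
        let r2 := s.getD 3 0
        let c2 := s.getD 4 0
        let degree := s.getD 5 0
        let value := if t == 1 then -degree else degree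
        (PySem.List.pyRange r1 (r2 + 1) 1).foldl (fun bd r =>
          (PySem.List.pyRange c1 (c2 + 1) 1).foldl (fun bd c =>
            pvAdd2B bd r c value) bd) bd
      else bd) = pvStepB := rfl
  have hwB : pvWide board board.length (board.getD 0 []).length := ⟨rfl, hrows⟩
  have hskB : ∀ s ∈ skill, pvBnd s board.length (board.getD 0 []).length := hsk
  simp only [solution, solution_alt, hstepA, hstepB, PySem.List.pyGetD_zero,
    Int.toNat_natCast]
  set n := board.length
  set m := (board.getD 0 []).length
  have hrect1 := pvRect_foldA skill _ (pvRect_replicate n m) hskB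
  have hpassH := pvPassH (n := n) (m := m) n (le_refl n) _ hrect1
  have hpassV := pvPassV (n := n) (m := m) m (le_refl m) _ hpassH.1
  have hlenB : (skill.foldl pvStepB board).length = n := (pvWide_foldB skill board hwB hskB).1
  rw [hlenB]
  refine PySem.List.foldl_congr_mem _ _ _ _ (fun acc i hi => ?_)
  obtain ⟨hi0, hin⟩ := PySem.List.mem_pyRange_one.1 hi
  refine PySem.List.foldl_congr_mem _ _ _ _ (fun acc2 j hj => ?_)
  obtain ⟨hj0, hjm⟩ := PySem.List.mem_pyRange_one.1 hj
  have hxn : i.toNat < n := by omega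
  have hym : j.toNat < m := by omega
  -- final value of A's difference array at (i, j)
  have hd3 : pvG ((PySem.List.pyRange 0 (m : Int) 1).foldl (fun d j =>
        (PySem.List.pyRange 0 (n : Int) 1).foldl
          (fun d i => pvAdd2A d (i + 1) j (PySem.List.pyGetD (PySem.List.pyGetD d i []) j 0)) d)
        ((PySem.List.pyRange 0 (n : Int) 1).foldl (fun d i =>
          (PySem.List.pyRange 0 (m : Int) 1).foldl
            (fun d j => pvAdd2A d i (j + 1) (PySem.List.pyGetD (PySem.List.pyGetD d i []) j 0)) d)
          (skill.foldl pvStepA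
            (List.replicate (n + 1) (List.replicate (m + 1) 0)))))
      i.toNat j.toNat = (skill.map (fun s => pvHit s i.toNat j.toNat)).sum := by
    rw [hpassV.2 i.toNat j.toNat, if_pos ⟨hym, by omega⟩]
    have hcong : ∀ k ∈ Finset.range (i.toNat + 1),
        pvG ((PySem.List.pyRange 0 (n : Int) 1).foldl (fun d i =>
          (PySem.List.pyRange 0 (m : Int) 1).foldl
            (fun d j => pvAdd2A d i (j + 1) (PySem.List.pyGetD (PySem.List.pyGetD d i []) j 0)) d)
          (skill.foldl pvStepA
            (List.replicate (n + 1) (List.replicate (m + 1) 0)))) k j.toNat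
        = ∑ l ∈ Finset.range (j.toNat + 1),
            (skill.map (fun s => pvDelta s k l)).sum := by
      intro k hk
      rw [hpassH.2 k j.toNat, if_pos ⟨by simp at hk; omega, by omega⟩]
      refine Finset.sum_congr rfl (fun l _ => ?_)
      rw [pvG_foldA skill _ (pvRect_replicate n m) hskB k l, pvG_replicate n m k l]
      ring
    rw [Finset.sum_congr rfl hcong]
    rw [Finset.sum_congr rfl (fun k _ => sum_swap_list (Finset.range (j.toNat + 1)) skill
      (fun l s => pvDelta s k l)), sum_swap_list (Finset.range (i.toNat + 1)) skill
      (fun k s => ∑ l ∈ Finset.range (j.toNat + 1), pvDelta s k l)]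
    exact congrArg List.sum (List.map_congr_left
      (fun s hs => pvTelescope (hskB s hs) i.toNat j.toNat))
  have hbd' := pvG_foldB skill board hwB hskB i.toNat j.toNat
  rw [pyGetD2_eq_pvG board i j hi0 hj0,
      pyGetD2_eq_pvG _ i j hi0 hj0, pyGetD2_eq_pvG _ i j hi0 hj0, hd3, hbd']
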